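-- pv_equiv track=rewrite | github.com/oguzhan1998eroglu/a_star | a_star.py | right_is_valid
-- ===== SOURCE A (Python) =====
-- def is_valid(index, row_size, column_size):
--     return (index[0] >= 0 and index[1] >= 0) and (index[0] < row_size and index[1] < column_size)
--
-- def right_is_valid(map, boundary, row_size, column_size):
--     starting_point = boundary[0]
--     finishing_point = boundary[1]
--     right_is_v = True
--     size = abs(starting_point[0] - finishing_point[0]) + 1
--     for i in range(size):
--         if not is_valid([finishing_point[0]-i, finishing_point[1]+1], row_size, column_size):
--             right_is_v = False
--     right_is_zero = True
--     if right_is_v: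
--         for i in range(size):
--             if map[boundary[1][0]-i][boundary[1][1]+1] != 0:
--                 right_is_zero = False
--     return right_is_zero and right_is_v
-- ===== SOURCE B (Python) =====
-- def right_is_valid(map, boundary, row_size, column_size):
--     sp = boundary[0]
--     fp = boundary[1]
--     size = abs(sp[0] - fp[0]) + 1
--     col = fp[1] + 1
--     if not (0 <= col < column_size and fp[0] < row_size and fp[0] - (size - 1) >= 0):
--         return False
--     return all(map[fp[0] - i][col] == 0 for i in range(size))
-- ===== Notes on version B (the rewrite author's own statement) =====
-- stated objective: simpler
-- what changed: Replaces the O(size) validity loop by an O(1) closed-form bounds check (col in range, top row < row_size, bottom row >= 0) with an early return, and the zero-scan loop by a single all(...) over the column that only runs when the bounds check passed.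
import Mathlib
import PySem

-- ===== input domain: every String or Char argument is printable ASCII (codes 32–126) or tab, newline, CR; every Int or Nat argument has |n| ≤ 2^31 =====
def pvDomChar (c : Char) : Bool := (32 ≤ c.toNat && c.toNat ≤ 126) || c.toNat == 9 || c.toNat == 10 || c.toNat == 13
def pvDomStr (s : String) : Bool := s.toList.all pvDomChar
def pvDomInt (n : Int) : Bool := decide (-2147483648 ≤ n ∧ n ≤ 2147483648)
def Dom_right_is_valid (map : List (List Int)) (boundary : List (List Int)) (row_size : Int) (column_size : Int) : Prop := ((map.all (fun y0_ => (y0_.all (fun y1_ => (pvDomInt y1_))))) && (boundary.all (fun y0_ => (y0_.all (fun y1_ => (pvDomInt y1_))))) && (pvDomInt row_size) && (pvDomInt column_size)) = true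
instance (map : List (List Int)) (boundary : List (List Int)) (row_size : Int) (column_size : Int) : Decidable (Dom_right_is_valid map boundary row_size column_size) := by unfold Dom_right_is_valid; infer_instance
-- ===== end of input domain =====

-- B replaces A's O(size) validity loop by a closed-form bounds check with an early
-- return, scanning the column only when the bounds check passed (objective: simpler).

-- ===== PORT A =====
-- port of helper is_valid (index is the 2-element list A builds)
def pvIsValid (index : List Int) (row_size : Int) (column_size : Int) : Bool :=
  let i0 := (PySem.List.pyGet? index 0).getD 0
  let i1 := (PySem.List.pyGet? index 1).getD 0
  (decide (0 ≤ i0) && decide (0 ≤ i1)) && (decide (i0 < row_size) && decide (i1 < column_size))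

def right_is_valid (map : List (List Int)) (boundary : List (List Int)) (row_size : Int) (column_size : Int) : Bool :=
  let starting_point := (PySem.List.pyGet? boundary 0).getD []
  let finishing_point := (PySem.List.pyGet? boundary 1).getD []
  let s0 := (PySem.List.pyGet? starting_point 0).getD 0
  let f0 := (PySem.List.pyGet? finishing_point 0).getD 0
  let f1 := (PySem.List.pyGet? finishing_point 1).getD 0
  let size : Int := |s0 - f0| + 1
  let right_is_v := (PySem.List.pyRange 0 size 1).foldl
    (fun v i => if !(pvIsValid [f0 - i, f1 + 1] row_size column_size) then false else v) true
  let right_is_zero :=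
    if right_is_v then
      (PySem.List.pyRange 0 size 1).foldl
        (fun z i =>
          if ((PySem.List.pyGet? ((PySem.List.pyGet? map (f0 - i)).getD []) (f1 + 1)).getD 0) ≠ 0
          then false else z) true
    else true
  right_is_zero && right_is_v

-- ===== PORT B =====
def right_is_valid_alt (map : List (List Int)) (boundary : List (List Int)) (row_size : Int) (column_size : Int) : Bool :=
  let sp := (PySem.List.pyGet? boundary 0).getD []
  let fp := (PySem.List.pyGet? boundary 1).getD []
  let size : Int := |((PySem.List.pyGet? sp 0).getD 0) - ((PySem.List.pyGet? fp 0).getD 0)| + 1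
  let col := ((PySem.List.pyGet? fp 1).getD 0) + 1
  let f0 := (PySem.List.pyGet? fp 0).getD 0
  if decide (0 ≤ col ∧ col < column_size ∧ f0 < row_size ∧ 0 ≤ f0 - (size - 1)) then
    (PySem.List.pyRange 0 size 1).all
      (fun i => ((PySem.List.pyGet? ((PySem.List.pyGet? map (f0 - i)).getD []) col).getD 0) == 0)
  else false

-- ===== PRECONDITION & SPEC =====
-- Pre_ excludes exactly the inputs on which the Python A raises: boundary without two
-- rows of the needed arity (IndexError on boundary[0]/[1][0]/[1][1]), and inputs whose
-- bounds check succeeds but some scanned map cell does not exist (IndexError on map).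
def Pre_right_is_valid (map : List (List Int)) (boundary : List (List Int)) (row_size : Int) (column_size : Int) : Prop :=
  2 ≤ boundary.length ∧
  1 ≤ (boundary.getD 0 []).length ∧
  2 ≤ (boundary.getD 1 []).length ∧
  ((0 ≤ (boundary.getD 1 []).getD 1 0 + 1 ∧
    (boundary.getD 1 []).getD 1 0 + 1 < column_size ∧
    (boundary.getD 1 []).getD 0 0 < row_size ∧
    0 ≤ (boundary.getD 1 []).getD 0 0 - ((|(boundary.getD 0 []).getD 0 0 - (boundary.getD 1 []).getD 0 0| + 1) - 1)) →
    ∀ i ∈ PySem.List.pyRange 0 (|(boundary.getD 0 []).getD 0 0 - (boundary.getD 1 []).getD 0 0| + 1) 1,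
      ((boundary.getD 1 []).getD 0 0 - i).toNat < map.length ∧
      ((boundary.getD 1 []).getD 1 0 + 1).toNat < (map.getD ((boundary.getD 1 []).getD 0 0 - i).toNat []).length)
instance (map : List (List Int)) (boundary : List (List Int)) (row_size : Int) (column_size : Int) : Decidable (Pre_right_is_valid map boundary row_size column_size) := by unfold Pre_right_is_valid; infer_instance

def pvWitness_right_is_valid : List (List Int) × List (List Int) × Int × Int :=
  ([[0, 0]], [[0, 0], [0, 0]], 1, 2)

def Spec_right_is_valid (map : List (List Int)) (boundary : List (List Int)) (row_size : Int) (column_size : Int) (out : Bool) : Prop := out = right_is_valid_alt map boundary row_size column_size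
instance (map : List (List Int)) (boundary : List (List Int)) (row_size : Int) (column_size : Int) (out : Bool) : Decidable (Spec_right_is_valid map boundary row_size column_size out) := by unfold Spec_right_is_valid; infer_instance

-- ===== CLAIM (what is proved, stated in full; the proofs are below) =====
def Claim_equal_right_is_valid : Prop := ∀ (map : List (List Int)) (boundary : List (List Int)) (row_size : Int) (column_size : Int), Dom_right_is_valid map boundary row_size column_size → Pre_right_is_valid map boundary row_size column_size → Spec_right_is_valid map boundary row_size column_size (right_is_valid map boundary row_size column_size)

-- ===== LEMMAS AND PROOFS =====

-- A's "set the flag to False on a failing element" loop is an `all`.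
theorem foldl_flag_eq_all {α : Type} (c : α → Bool) (l : List α) (b : Bool) :
    l.foldl (fun v i => if !(c i) then false else v) b = (b && l.all c) := by
  induction l generalizing b with
  | nil => simp
  | cons x xs ih =>
    simp only [List.foldl_cons, List.all_cons, ih]
    cases c x <;> simp

theorem range_valid_closed (s0 f0 f1 row_size column_size : Int) :
    ((PySem.List.pyRange 0 (|s0 - f0| + 1) 1).all
      (fun i => pvIsValid [f0 - i, f1 + 1] row_size column_size)) =
    decide (0 ≤ f1 + 1 ∧ f1 + 1 < column_size ∧ f0 < row_size ∧ 0 ≤ f0 - ((|s0 - f0| + 1) - 1)) := by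
  have hs : (0:Int) ≤ |s0 - f0| := abs_nonneg _
  rw [Bool.eq_iff_iff]
  simp only [List.all_eq_true, PySem.List.mem_pyRange_one, pvIsValid, decide_eq_true_eq,
    Bool.and_eq_true]
  constructor
  · intro H
    have h0 := H 0 ⟨le_refl 0, by omega⟩
    have h1 := H (|s0 - f0|) ⟨hs, by omega⟩
    simp [PySem.List.pyGet?, PySem.List.pyIdx?] at h0 h1
    omega
  · intro H i hi
    simp [PySem.List.pyGet?, PySem.List.pyIdx?]
    omega

theorem foldl_zero_eq_all (m : Int → Int) (l : List Int) (b : Bool) :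
    l.foldl (fun z i => if m i ≠ 0 then false else z) b = (b && l.all (fun i => m i == 0)) := by
  induction l generalizing b with
  | nil => simp
  | cons x xs ih =>
    simp only [List.foldl_cons, List.all_cons, ih]
    by_cases h : m x = 0 <;> simp [h]

theorem right_is_valid_eq_alt (map : List (List Int)) (boundary : List (List Int)) (row_size : Int) (column_size : Int) :
    right_is_valid map boundary row_size column_size = right_is_valid_alt map boundary row_size column_size := by
  unfold right_is_valid right_is_valid_alt
  simp only [foldl_flag_eq_all, foldl_zero_eq_all, Bool.true_and, range_valid_closed,
    add_sub_cancel_right]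
  split_ifs with h
  · rw [h, Bool.and_true]
  · simp only [Bool.not_eq_true] at h
    rw [h, Bool.and_false]

-- ===== VERDICT (by name: the statement is the Claim_ definition above) =====
theorem right_is_valid_spec : Claim_equal_right_is_valid := by
  intro map boundary row_size column_size _ _
  exact right_is_valid_eq_alt map boundary row_size column_size
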